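-- pv_equiv track=rewrite | github.com/liupengsay/PyIsTheBestLang | src/mathmatics/number_theory.py | lc_lcp14
-- ===== SOURCE A (Python) =====
-- from math import inf
-- from typing import List
--
-- class NumberTheoryPrimeFactor:
--     def __init__(self, ceil):
--         self.ceil = ceil
--         self.prime_factor = [[] for _ in range(self.ceil + 1)]
--         self.min_prime = [0] * (self.ceil + 1)
--         self.get_min_prime_and_prime_factor()
--         return
--
--     def get_min_prime_and_prime_factor(self):
--         # 模板：计算 1 到 self.ceil 所有数字的最小质数因子
--         for i in range(2, self.ceil + 1):
--             if not self.min_prime[i]: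
--                 self.min_prime[i] = i
--                 for j in range(i * i, self.ceil + 1, i):
--                     if not self.min_prime[j]:
--                         self.min_prime[j] = i
--
--         # 模板：计算 1 到 self.ceil 所有数字的质数分解（可选）
--         for num in range(2, self.ceil + 1):
--             i = num
--             while num > 1:
--                 p = self.min_prime[num]
--                 cnt = 0
--                 while num % p == 0:
--                     num //= p
--                     cnt += 1
--                 self.prime_factor[i].append([p, cnt])
--         return
--
-- def lc_lcp14(nums: List[int]) -> int:
--     # 模板：计算 1 到 n 的数所有的质因子并使用动态规划计数
--     nt = NumberTheoryPrimeFactor(max(nums))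
--     ind = dict()
--     n = len(nums)
--     dp = [inf] * (n + 1)
--     dp[0] = 0
--     for i, num in enumerate(nums):
--         while num > 1:
--             p = nt.min_prime[num]
--             while num % p == 0:
--                 num //= p
--             if p not in ind or dp[i] < dp[ind[p]]:
--                 ind[p] = i
--             if dp[ind[p]] + 1 < dp[i + 1]:
--                 dp[i + 1] = dp[ind[p]] + 1
--             if dp[i] + 1 < dp[i + 1]:
--                 dp[i + 1] = dp[i] + 1
--     return dp[-1] if dp[-1] < inf else -1
-- ===== SOURCE B (Python) =====
-- from math import inf
--
-- def _distinct_primes(num):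
--     # distinct prime factors of num by trial division, ascending
--     ps = []
--     p = 2
--     while p * p <= num:
--         if num % p == 0:
--             ps.append(p)
--             while num % p == 0:
--                 num //= p
--         p += 1
--     if num > 1:
--         ps.append(num)
--     return ps
--
-- def lc_lcp14(nums):
--     best = {}      # best[p] = smallest dp value among positions whose number has prime factor p
--     prev = 0       # dp value of the current prefix boundary
--     for num in nums:
--         cur = inf
--         for p in _distinct_primes(num):
--             b = best.get(p, inf)
--             if prev < b:
--                 b = prev
--             best[p] = b
--             if b + 1 < cur:
--                 cur = b + 1
--             if prev + 1 < cur: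
--                 cur = prev + 1
--         prev = cur
--     return prev if prev < inf else -1
-- ===== Notes on version B (the rewrite author's own statement) =====
-- stated objective: simpler
-- what changed: Drops the NumberTheoryPrimeFactor sieve class (smallest-prime-factor table up to max(nums)) and the index dp array plus prime->index dict, replacing them with per-element trial-division factorisation, a rolling dp value and a prime->best-dp-value dictionary.
-- outside the precondition, e.g. on lc_lcp14([]): A raises ValueError, B returns 0
-- crash fix: On the empty list A raises ValueError (max() of an empty sequence) while B returns 0, the natural answer for zero numbers. — e.g. on lc_lcp14([]): A raises ValueError, B returns 0
import Mathlib
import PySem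

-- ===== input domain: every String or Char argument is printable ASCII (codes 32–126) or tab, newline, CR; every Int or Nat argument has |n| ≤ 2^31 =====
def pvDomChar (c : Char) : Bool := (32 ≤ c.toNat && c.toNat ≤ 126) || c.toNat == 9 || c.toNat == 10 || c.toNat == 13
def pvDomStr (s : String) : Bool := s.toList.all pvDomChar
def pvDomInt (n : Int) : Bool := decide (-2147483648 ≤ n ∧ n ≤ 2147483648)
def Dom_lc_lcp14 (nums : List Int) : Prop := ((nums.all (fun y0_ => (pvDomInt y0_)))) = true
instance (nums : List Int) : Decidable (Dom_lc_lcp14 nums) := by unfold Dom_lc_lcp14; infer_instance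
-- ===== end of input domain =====

-- B replaces A's precomputed smallest-prime-factor sieve (the NumberTheoryPrimeFactor class),
-- dp array and index-per-prime dict by per-element trial-division factorisation with a rolling
-- dp value and a best-dp-value-per-prime dictionary; objective: simpler.

-- ===== PORT A =====

-- shared small helpers (both Pythons compare against math.inf and add 1, and share the
-- `while num % p == 0: num //= p` inner loop)

-- x < y where `none` stands for math.inf
def pvLtO : Option Int → Option Int → Bool
  | some a, some b => decide (a < b)
  | some _, none   => true
  | none,   _      => false

-- x + 1 where `none` stands for math.inf
def pvAdd1 : Option Int → Option Int
  | some a => some (a + 1)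
  | none   => none

-- `while num % p == 0: num //= p` (fuel-guarded)
def pvStrip (p : Int) : Int → Nat → Int
  | num, 0 => num
  | num, f+1 => if PySem.Int.mod num p == 0 then pvStrip p (PySem.Int.floordiv num p) f else num

-- NumberTheoryPrimeFactor(ceil).min_prime: inner marking loop `for j in range(i*i, ceil+1, i)`
def pvSieveInner (ceil i : Int) (mp : List Int) : List Int :=
  (PySem.List.pyRange (i*i) (ceil+1) i).foldl
    (fun mp j => if mp.getD j.toNat 0 == 0 then mp.set j.toNat i else mp) mp

-- …outer loop body `if not self.min_prime[i]: …`
def pvSieveOuter (ceil : Int) (mp : List Int) (i : Int) : List Int :=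
  if mp.getD i.toNat 0 == 0 then pvSieveInner ceil i (mp.set i.toNat i) else mp

-- NumberTheoryPrimeFactor(ceil).min_prime (the prime_factor table A also builds is never read
-- by lc_lcp14, so its computation is omitted; min_prime is ported verbatim)
def pvSieve (ceil : Int) : List Int :=
  (PySem.List.pyRange 2 (ceil+1) 1).foldl (pvSieveOuter ceil) (List.replicate (ceil+1).toNat 0)

-- the dict/dp update block of A's inner while-loop body (after p is taken and num stripped)
def pvStepA (i : Nat) (s : PySem.Dict Int Nat × List (Option Int)) (p : Int) :
    PySem.Dict Int Nat × List (Option Int) :=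
  let ind := s.1
  let dp := s.2
  let ind := if !(ind.contains p) || pvLtO (dp.getD i none) (dp.getD (ind.getD p 0) none) then
      ind.insert p i else ind
  let k := ind.getD p 0
  let dp := if pvLtO (pvAdd1 (dp.getD k none)) (dp.getD (i+1) none) then
      dp.set (i+1) (pvAdd1 (dp.getD k none)) else dp
  let dp := if pvLtO (pvAdd1 (dp.getD i none)) (dp.getD (i+1) none) then
      dp.set (i+1) (pvAdd1 (dp.getD i none)) else dp
  (ind, dp)

-- A's `while num > 1:` loop for element i (fuel-guarded; dp values: none = math.inf)
def pvLoopA (mp : List Int) (i : Nat) :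
    Int → PySem.Dict Int Nat × List (Option Int) → Nat → PySem.Dict Int Nat × List (Option Int)
  | _num, s, 0 => s
  | num, s, f+1 =>
    if num > 1 then
      pvLoopA mp i (pvStrip (mp.getD num.toNat 0) num num.toNat)
        (pvStepA i s (mp.getD num.toNat 0)) f
    else s

def lc_lcp14 (nums : List Int) : Int :=
  match PySem.List.max? nums (fun x => x) with
  | none => 0    -- Python: max([]) raises ValueError; excluded by Pre_
  | some m =>
    let mp := pvSieve m
    let n := nums.length
    let dp : List (Option Int) := some 0 :: List.replicate n none   -- dp = [inf]*(n+1); dp[0] = 0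
    let s := (PySem.List.enumerate nums).foldl
      (fun (s : PySem.Dict Int Nat × List (Option Int)) iv =>
        pvLoopA mp iv.1.toNat iv.2 s iv.2.toNat) (PySem.Dict.empty, dp)
    let last := s.2.getD n none                                      -- dp[-1]
    if pvLtO last none then last.getD 0 else -1

-- ===== PORT B =====

-- trial-division distinct prime factors (the `while p*p <= num` loop of _distinct_primes)
def pvTrial : Int → Int → List Int → Nat → List Int
  | _p, num, acc, 0 => if num > 1 then acc ++ [num] else acc
  | p, num, acc, f+1 =>
    if p * p ≤ num then
      if PySem.Int.mod num p == 0 then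
        pvTrial (p+1) (pvStrip p num num.toNat) (acc ++ [p]) f
      else pvTrial (p+1) num acc f
    else if num > 1 then acc ++ [num] else acc

def pvPrimes (num : Int) : List Int := pvTrial 2 num [] (num.toNat + 1)

-- body of B's `for p in _distinct_primes(num):` loop; state (best, cur), none = math.inf
def pvStepB (prev : Option Int) (t : PySem.Dict Int (Option Int) × Option Int) (p : Int) :
    PySem.Dict Int (Option Int) × Option Int :=
  let b := t.1.getD p none
  let b := if pvLtO prev b then prev else b
  let best := t.1.insert p b
  let cur := if pvLtO (pvAdd1 b) t.2 then pvAdd1 b else t.2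
  let cur := if pvLtO (pvAdd1 prev) cur then pvAdd1 prev else cur
  (best, cur)

def lc_lcp14_alt (nums : List Int) : Int :=
  let s := nums.foldl
    (fun (s : Option Int × PySem.Dict Int (Option Int)) num =>
      let t := (pvPrimes num).foldl (pvStepB s.1) (s.2, none)
      (t.2, t.1)) (some 0, PySem.Dict.empty)
  match s.1 with
  | some v => v
  | none => -1

-- ===== PRECONDITION & SPEC =====
-- Pre_ excludes only the empty list, on which A's max(nums) raises ValueError.
def Pre_lc_lcp14 (nums : List Int) : Prop := nums ≠ []
instance (nums : List Int) : Decidable (Pre_lc_lcp14 nums) := by unfold Pre_lc_lcp14; infer_instance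

def pvWitness_lc_lcp14 : List Int := [2]

-- On the empty list A raises ValueError (max of empty sequence) while B returns 0 (no groups needed).
def Raises_lc_lcp14 (nums : List Int) : Prop := nums = []
instance (nums : List Int) : Decidable (Raises_lc_lcp14 nums) := by unfold Raises_lc_lcp14; infer_instance
def pvRaiseWitness_lc_lcp14 : List Int := []
def pvRaiseWitnessOut_lc_lcp14 : Int := 0

def Spec_lc_lcp14 (nums : List Int) (out : Int) : Prop := out = lc_lcp14_alt nums
instance (nums : List Int) (out : Int) : Decidable (Spec_lc_lcp14 nums out) := by unfold Spec_lc_lcp14; infer_instance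

-- ===== CLAIM (what is proved, stated in full; the proofs are below) =====
def Claim_equal_lc_lcp14 : Prop := ∀ (nums : List Int), Dom_lc_lcp14 nums → Pre_lc_lcp14 nums → Spec_lc_lcp14 nums (lc_lcp14 nums)

def Claim_raises_lc_lcp14 : Prop := (∀ (nums : List Int), Dom_lc_lcp14 nums → Raises_lc_lcp14 nums → ¬ Pre_lc_lcp14 nums) ∧ (Dom_lc_lcp14 (pvRaiseWitness_lc_lcp14) ∧ Raises_lc_lcp14 (pvRaiseWitness_lc_lcp14) ∧ lc_lcp14_alt (pvRaiseWitness_lc_lcp14) = pvRaiseWitnessOut_lc_lcp14)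

-- ===== LEMMAS AND PROOFS =====

def stripNat (p : Nat) (n : Nat) : Nat :=
  if h : 2 ≤ p ∧ p ∣ n ∧ n ≠ 0 then stripNat p (n / p) else n
  termination_by n
  decreasing_by
    exact Nat.div_lt_self (Nat.pos_of_ne_zero h.2.2) (by omega)

theorem pvDivPos (p n : Nat) (h : 2 ≤ p ∧ p ∣ n ∧ n ≠ 0) : n / p ≠ 0 := by
  have := Nat.le_of_dvd (Nat.pos_of_ne_zero h.2.2) h.2.1
  have : 1 ≤ n / p := (Nat.one_le_div_iff (by omega)).mpr this
  omega

theorem stripNat_le (p n : Nat) : stripNat p n ≤ n := by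
  induction n using Nat.strong_induction_on with
  | _ n ih =>
    rw [stripNat]
    split_ifs with h
    · have hlt : n / p < n := Nat.div_lt_self (Nat.pos_of_ne_zero h.2.2) (by omega)
      exact le_trans (ih _ hlt) (Nat.div_le_self n p)
    · exact le_rfl

theorem stripNat_dvd (p n : Nat) : stripNat p n ∣ n := by
  induction n using Nat.strong_induction_on with
  | _ n ih =>
    rw [stripNat]
    split_ifs with h1
    · exact dvd_trans (ih _ (Nat.div_lt_self (Nat.pos_of_ne_zero h1.2.2) (by omega)))
        (Nat.div_dvd_of_dvd h1.2.1)
    · exact dvd_rfl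

theorem stripNat_not_dvd (p n : Nat) (hp : 2 ≤ p) (hn : n ≠ 0) : ¬ p ∣ stripNat p n := by
  induction n using Nat.strong_induction_on with
  | _ n ih =>
    rw [stripNat]
    split_ifs with h1
    · exact ih _ (Nat.div_lt_self (Nat.pos_of_ne_zero h1.2.2) (by omega)) (pvDivPos p n h1)
    · intro hd
      exact h1 ⟨hp, hd, hn⟩

theorem stripNat_lt (p n : Nat) (hp : 2 ≤ p) (hd : p ∣ n) (hn : n ≠ 0) : stripNat p n < n := by
  rw [stripNat, dif_pos ⟨hp, hd, hn⟩]
  calc stripNat p (n / p) ≤ n / p := stripNat_le p (n / p)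
    _ < n := Nat.div_lt_self (Nat.pos_of_ne_zero hn) (by omega)

theorem pvStrip_eq (fuel : Nat) (p : Int) (n : Nat) (hp : 2 ≤ p) (hf : n ≤ fuel) (hn : n ≠ 0) :
    pvStrip p (n : Int) fuel = ((stripNat p.toNat n : Nat) : Int) := by
  induction fuel generalizing n with
  | zero => omega
  | succ f ih =>
    have hp0 : (0:Int) < p := by omega
    have hpc : ((p.toNat : Nat) : Int) = p := Int.toNat_of_nonneg (by omega)
    have hp2 : 2 ≤ p.toNat := by omega
    show (if PySem.Int.mod (n:Int) p == 0 then pvStrip p (PySem.Int.floordiv (n:Int) p) f else (n:Int)) = _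
    by_cases hd : p.toNat ∣ n
    · have hdi : p ∣ (n : Int) := by
        rw [← hpc]; exact_mod_cast Int.natCast_dvd_natCast.mpr hd
      have hc : PySem.Int.mod (n:Int) p = 0 := (PySem.Int.mod_eq_zero_iff_dvd _ _).mpr hdi
      rw [hc]
      simp only [beq_self_eq_true, if_true]
      have hfd : PySem.Int.floordiv (n:Int) p = ((n / p.toNat : Nat) : Int) := by
        rw [← hpc]; exact PySem.Int.floordiv_natCast n p.toNat
      rw [hfd, ih (n / p.toNat) (by
          have : n / p.toNat < n := Nat.div_lt_self (Nat.pos_of_ne_zero hn) (by omega)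
          omega) (pvDivPos _ _ ⟨hp2, hd, hn⟩)]
      congr 1
      conv_rhs => rw [stripNat, dif_pos ⟨hp2, hd, hn⟩]
    · have hdi : ¬ p ∣ (n : Int) := by
        rw [← hpc]; exact fun hc => hd (Int.natCast_dvd_natCast.mp hc)
      have hc : ¬ PySem.Int.mod (n:Int) p = 0 := fun hc => hdi ((PySem.Int.mod_eq_zero_iff_dvd _ _).mp hc)
      simp only [beq_iff_eq, hc, if_false]
      rw [stripNat, dif_neg (by tauto)]

def pfChain (n : Nat) : List Nat :=
  if h : 2 ≤ n then n.minFac :: pfChain (stripNat n.minFac n) else []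
  termination_by n
  decreasing_by
    exact stripNat_lt _ _ ((Nat.minFac_prime (by omega : n ≠ 1)).two_le) (Nat.minFac_dvd n) (by omega)

-- the cast of a Nat prime chain to Int (the form both ports produce)
def pfCast : List Nat → List Int
  | [] => []
  | q :: l => (q : Int) :: pfCast l

theorem pfChain_of_lt (n : Nat) (h : n < 2) : pfChain n = [] := by
  rw [pfChain]; simp [Nat.not_le.mpr h]

theorem pfChain_prime (n : Nat) (h : n.Prime) : pfChain n = [n] := by
  have h2 := h.two_le
  have hmf : n.minFac = n := (Nat.prime_def_minFac.mp h).2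
  rw [pfChain, dif_pos h2, hmf]
  have h1 : stripNat n n = 1 := by
    rw [stripNat, dif_pos ⟨h2, dvd_rfl, by omega⟩, Nat.div_self (by omega)]
    rw [stripNat, dif_neg (by
      intro hc
      exact absurd (Nat.le_of_dvd one_pos hc.2.1) (by omega))]
  rw [h1, pfChain_of_lt 1 (by omega)]

theorem minFac_eq_of (n p : Nat) (h2 : 2 ≤ n) (hp : 2 ≤ p) (hd : p ∣ n)
    (hnd : ∀ d : Nat, 2 ≤ d → d < p → ¬ d ∣ n) : n.minFac = p := by
  have hle : n.minFac ≤ p := Nat.minFac_le_of_dvd hp hd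
  have hge : 2 ≤ n.minFac := (Nat.minFac_prime (by omega : n ≠ 1)).two_le
  by_contra hne
  exact hnd n.minFac hge (by omega) (Nat.minFac_dvd n)

theorem prime_of_no_small (p : Int) (n : Nat) (hp : 2 ≤ p) (h2 : 2 ≤ n)
    (hnd : ∀ d : Nat, 2 ≤ d → (d : Int) < p → ¬ d ∣ n) (hsq : (n : Int) < p * p) :
    n.Prime := by
  by_contra hnp
  have hmf2 : 2 ≤ n.minFac := (Nat.minFac_prime (by omega : n ≠ 1)).two_le
  have hsq2 : n.minFac * n.minFac ≤ n := by
    have := Nat.minFac_sq_le_self (by omega : 0 < n) hnp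
    nlinarith [this]
  have hlt : (n.minFac : Int) < p := by
    by_contra hge
    have hge' : p ≤ (n.minFac : Int) := not_lt.mp hge
    have hcast : (n.minFac : Int) * n.minFac ≤ (n : Int) := by exact_mod_cast hsq2
    nlinarith
  exact hnd n.minFac hmf2 hlt (Nat.minFac_dvd n)

theorem pvTrial_residual (p : Int) (n : Nat) (acc : List Int) (hp : 2 ≤ p)
    (hnd : ∀ d : Nat, 2 ≤ d → (d : Int) < p → ¬ d ∣ n) (hsq : (n : Int) < p * p) :
    (if ((n : Int) > 1) then acc ++ [(n : Int)] else acc) = acc ++ pfCast (pfChain n) := by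
  by_cases h2 : 2 ≤ n
  · have hprime := prime_of_no_small p n hp h2 hnd hsq
    rw [pfChain_prime n hprime, if_pos (by exact_mod_cast (by omega : (1:Int) < (n:Int)))]
    simp [pfCast]
  · rw [pfChain_of_lt n (by omega), if_neg (by exact_mod_cast (by omega : ¬ (1:Int) < (n:Int)))]
    simp [pfCast]

theorem pvTrial_eq (fuel : Nat) (p : Int) (n : Nat) (acc : List Int) (hp : 2 ≤ p)
    (hnd : ∀ d : Nat, 2 ≤ d → (d : Int) < p → ¬ d ∣ n)
    (hf : (n : Int) < (p + fuel) * (p + fuel)) :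
    pvTrial p (n : Int) acc fuel = acc ++ pfCast (pfChain n) := by
  induction fuel generalizing p n acc with
  | zero =>
    show (if ((n : Int) > 1) then acc ++ [(n : Int)] else acc) = _
    exact pvTrial_residual p n acc hp hnd (by simpa using hf)
  | succ f ih =>
    show (if p * p ≤ (n:Int) then _ else _) = _
    by_cases hsq : p * p ≤ (n : Int)
    · rw [if_pos hsq]
      have hn4 : 4 ≤ (n : Int) := le_trans (by nlinarith) hsq
      have hn0 : n ≠ 0 := by omega
      have h2n : 2 ≤ n := by omega
      have hpc : ((p.toNat : Nat) : Int) = p := Int.toNat_of_nonneg (by omega)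
      have hp2 : 2 ≤ p.toNat := by omega
      by_cases hd : p.toNat ∣ n
      · have hdi : p ∣ (n : Int) := by rw [← hpc]; exact_mod_cast Int.natCast_dvd_natCast.mpr hd
        have hc : PySem.Int.mod (n:Int) p = 0 := (PySem.Int.mod_eq_zero_iff_dvd _ _).mpr hdi
        rw [hc]
        simp only [beq_self_eq_true, if_true]
        have htn : ((n:Int)).toNat = n := Int.toNat_natCast n
        rw [htn, pvStrip_eq n p n hp le_rfl hn0]
        have hmf : n.minFac = p.toNat := minFac_eq_of n p.toNat h2n hp2 hd (by
          intro d hd2 hdlt hddvd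
          exact hnd d hd2 (by omega) hddvd)
        have hchain : pfChain n = p.toNat :: pfChain (stripNat p.toNat n) := by
          rw [pfChain, dif_pos h2n, hmf]
        rw [hchain]
        have := ih (p+1) (stripNat p.toNat n) (acc ++ [p]) (by omega)
          (by
            intro d hd2 hdlt hddvd
            have hdle : (d : Int) ≤ p := by omega
            by_cases hdp : d = p.toNat
            · exact stripNat_not_dvd p.toNat n hp2 hn0 (hdp ▸ hddvd)
            · have : (d : Int) < p := by
                rcases lt_or_eq_of_le hdle with h | h
                · exact h
                · exact absurd (by rw [← hpc] at h; exact_mod_cast h) hdp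
              exact hnd d hd2 this (dvd_trans hddvd (stripNat_dvd p.toNat n)))
          (by
            have hle : (stripNat p.toNat n : Int) ≤ (n : Int) := by exact_mod_cast stripNat_le p.toNat n
            have : p + 1 + (f : Int) = p + (f + 1 : Nat) := by push_cast; ring
            rw [this]; omega)
        rw [this, List.append_assoc]
        simp [pfCast, hpc]
      · have hdi : ¬ p ∣ (n : Int) := by
          rw [← hpc]; exact fun hc => hd (Int.natCast_dvd_natCast.mp hc)
        have hc : ¬ PySem.Int.mod (n:Int) p = 0 := fun hc => hdi ((PySem.Int.mod_eq_zero_iff_dvd _ _).mp hc)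
        simp only [beq_iff_eq, hc, if_false]
        exact ih (p+1) n acc (by omega)
          (by
            intro d hd2 hdlt hddvd
            have hdle : (d : Int) ≤ p := by omega
            rcases lt_or_eq_of_le hdle with h | h
            · exact hnd d hd2 h hddvd
            · have hdp : d = p.toNat := by omega
              exact hd (hdp ▸ hddvd)
          )
          (by
            have : p + 1 + (f : Int) = p + (f + 1 : Nat) := by push_cast; ring
            rw [this]; exact hf)
    · rw [if_neg hsq]
      exact pvTrial_residual p n acc hp hnd (by omega)

theorem pvPrimes_eq (num : Int) : pvPrimes num = pfCast (pfChain num.toNat) := by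
  by_cases h2 : 2 ≤ num
  · have hc : ((num.toNat : Nat) : Int) = num := Int.toNat_of_nonneg (by omega)
    rw [pvPrimes, ← hc]
    refine pvTrial_eq (num.toNat + 1) 2 num.toNat [] (by omega) (by intro d hd2 hdlt; omega) ?_
    have h0 : (0:Int) ≤ (num.toNat : Int) := by positivity
    push_cast
    nlinarith
  · have ht : num.toNat = 0 ∨ num.toNat = 1 := by omega
    have hch : pfChain num.toNat = [] := by
      rcases ht with h | h <;> rw [h] <;> exact pfChain_of_lt _ (by omega)
    rw [pvPrimes, hch, pfCast]
    show (if (2:Int) * 2 ≤ num then _ else if num > 1 then [] ++ [num] else []) = _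
    rw [if_neg (by omega), if_neg (by omega)]

-- helper getD facts
theorem pvGetD_set_self (l : List Int) (n : Nat) (a : Int) (h : n < l.length) :
    (l.set n a).getD n 0 = a := by
  simp [List.getD_eq_getElem?_getD, h]

theorem pvGetD_set_ne (l : List Int) (n m : Nat) (a : Int) (h : n ≠ m) :
    (l.set n a).getD m 0 = l.getD m 0 := by
  simp [List.getD_eq_getElem?_getD, List.getElem?_set_ne h]

-- inner sieve loop, pointwise
theorem pvInnerFold_length (i : Int) (js : List Int) (mp : List Int) :
    (js.foldl (fun mp j => if mp.getD j.toNat 0 == 0 then mp.set j.toNat i else mp) mp).length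
      = mp.length := by
  induction js generalizing mp with
  | nil => rfl
  | cons j js ih =>
    simp only [List.foldl_cons]
    rw [ih]
    split <;> simp

theorem pvInnerFold_getD (i : Int) (hi : 2 ≤ i) (js : List Int) (mp : List Int)
    (hjs : ∀ j ∈ js, 0 < j ∧ j.toNat < mp.length) (k : Nat) :
    (js.foldl (fun mp j => if mp.getD j.toNat 0 == 0 then mp.set j.toNat i else mp) mp).getD k 0
      = if ((k : Int) ∈ js ∧ mp.getD k 0 = 0) then i else mp.getD k 0 := by
  induction js generalizing mp with
  | nil => simp
  | cons j js ih =>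
    simp only [List.foldl_cons]
    have hj := hjs j List.mem_cons_self
    set mp1 := (if (mp.getD j.toNat 0 == 0) = true then mp.set j.toNat i else mp) with hmp1
    have hlen1 : mp1.length = mp.length := by rw [hmp1]; split <;> simp
    rw [ih mp1 (fun x hx => by rw [hlen1]; exact hjs x (List.mem_cons_of_mem j hx))]
    by_cases hkj : (k : Int) = j
    · have hjk : j.toNat = k := by omega
      by_cases h0 : mp.getD k 0 = 0
      · have hm1 : mp1 = mp.set k i := by rw [hmp1, hjk, if_pos (by rw [h0]; simp)]
        have hset : mp1.getD k 0 = i := by rw [hm1]; exact pvGetD_set_self mp k i (by omega)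
        rw [if_neg (fun hc => by have h2 := hc.2; rw [hset] at h2; omega), hset,
          if_pos ⟨by rw [hkj]; exact List.mem_cons_self, h0⟩]
      · have hm1 : mp1 = mp := by rw [hmp1, hjk, if_neg (by simpa using h0)]
        rw [hm1, if_neg (fun hc => h0 hc.2), if_neg (fun hc => h0 hc.2)]
    · have hne : j.toNat ≠ k := by omega
      have hget : mp1.getD k 0 = mp.getD k 0 := by
        rw [hmp1]; split
        · exact pvGetD_set_ne mp j.toNat k i hne
        · rfl
      rw [hget]
      have hmemc : ((k:Int) ∈ j :: js) ↔ ((k:Int) ∈ js) := by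
        simp [List.mem_cons, hkj]
      by_cases hmemk : (k : Int) ∈ js <;> by_cases h0 : mp.getD k 0 = 0 <;>
        simp [hmemk, h0, hmemc]

-- the invariant of the outer sieve loop
def pvSieveInv (m I : Int) (mp : List Int) : Prop :=
  mp.length = (m+1).toNat ∧
  ∀ k : Nat, 2 ≤ k → (k : Int) ≤ m →
    mp.getD k 0 = if ((k.minFac : Int) < I) then (k.minFac : Int) else 0

theorem pvSieveOuter_step (m I : Int) (mp : List Int) (h2 : 2 ≤ I) (hIm : I ≤ m)
    (h : pvSieveInv m I mp) : pvSieveInv m (I+1) (pvSieveOuter m mp I) := by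
  obtain ⟨hlen, hinv⟩ := h
  have hm2 : (2:Int) ≤ m := le_trans h2 hIm
  have hq2 : 2 ≤ I.toNat := by omega
  have hqc : ((I.toNat : Nat) : Int) = I := by omega
  have hqm : (I.toNat : Int) ≤ m := by omega
  have hlen' : (m+1).toNat = m.toNat + 1 := by omega
  have hmfq2 : 2 ≤ I.toNat.minFac := (Nat.minFac_prime (by omega : I.toNat ≠ 1)).two_le
  have hmpq := hinv I.toNat hq2 hqm
  by_cases hC : ((I.toNat.minFac : Int) < I)
  · -- min_prime[I] already set: I is composite, nothing changes
    have hne : ¬ (mp.getD I.toNat 0 == 0) = true := by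
      rw [hmpq, if_pos hC]; simp; omega
    rw [pvSieveOuter, if_neg hne]
    have hInp : ¬ I.toNat.Prime := by
      intro hp
      have := (Nat.prime_def_minFac.mp hp).2
      omega
    refine ⟨hlen, fun k hk2 hkm => ?_⟩
    rw [hinv k hk2 hkm]
    have hkne : (k.minFac : Int) ≠ I := by
      intro hc
      have : k.minFac = I.toNat := by omega
      exact hInp (this ▸ Nat.minFac_prime (by omega : k ≠ 1))
    by_cases hlt : ((k.minFac : Int) < I)
    · rw [if_pos hlt, if_pos (by omega)]
    · rw [if_neg hlt, if_neg (by omega)]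
  · -- min_prime[I] = 0: I is prime; mark I and its multiples from I*I
    have heq : (mp.getD I.toNat 0 == 0) = true := by rw [hmpq, if_neg hC]; simp
    rw [pvSieveOuter, if_pos heq]
    have hmfle : I.toNat.minFac ≤ I.toNat := Nat.minFac_le (by omega)
    have hmfeq : I.toNat.minFac = I.toNat := by omega
    have hIp : I.toNat.Prime := Nat.prime_def_minFac.mpr ⟨hq2, hmfeq⟩
    have hqlt : I.toNat < mp.length := by omega
    set mp2 := mp.set I.toNat I with hmp2
    have hlen2 : mp2.length = (m+1).toNat := by simp [hmp2, hlen]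
    have hmem : ∀ x : Int, x ∈ PySem.List.pyRange (I*I) (m+1) I ↔
        I*I ≤ x ∧ x < m+1 ∧ I ∣ x := by
      intro x
      rw [PySem.List.mem_pyRange_iff_of_pos (by omega)]
      constructor
      · rintro ⟨ha, hb, hc⟩
        refine ⟨ha, hb, ?_⟩
        have h1 : I ∣ I*I := Dvd.intro I rfl
        have := dvd_add hc h1
        simpa using this
      · rintro ⟨ha, hb, hc⟩
        exact ⟨ha, hb, by
          have h1 : I ∣ I*I := Dvd.intro I rfl
          exact dvd_sub hc h1⟩
    rw [pvSieveInner]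
    refine ⟨by rw [pvInnerFold_length, hlen2], fun k hk2 hkm => ?_⟩
    have hkl : k < mp2.length := by omega
    rw [pvInnerFold_getD I h2 _ mp2 (fun j hj => by
        rw [hmem] at hj
        constructor
        · nlinarith [hj.1, hj.2.1]
        · omega) k]
    by_cases hkq : k = I.toNat
    · subst hkq
      have hset : mp2.getD I.toNat 0 = I := pvGetD_set_self mp I.toNat I (by omega)
      rw [if_neg (fun hc => by have h5 := hc.2; rw [hset] at h5; omega), hset,
        if_pos (by omega)]
      omega
    · have hmf2k : 2 ≤ k.minFac := (Nat.minFac_prime (by omega : k ≠ 1)).two_le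
      have hget2 : mp2.getD k 0 = mp.getD k 0 := pvGetD_set_ne mp I.toNat k I (fun hc => hkq hc.symm)
      rw [hget2, hinv k hk2 hkm]
      by_cases hlt : ((k.minFac : Int) < I)
      · rw [if_pos hlt, if_neg (fun hc => by have h6 := hc.2; omega), if_pos (by omega)]
      · rw [if_neg hlt]
        by_cases hmemk : (k : Int) ∈ PySem.List.pyRange (I*I) (m+1) I
        · rw [if_pos ⟨hmemk, rfl⟩]
          rw [hmem] at hmemk
          have hdvd : I.toNat ∣ k := by
            have h3 : (I.toNat : Int) ∣ (k : Int) := by rw [hqc]; exact hmemk.2.2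
            exact_mod_cast h3
          have : k.minFac ≤ I.toNat := Nat.minFac_le_of_dvd hq2 hdvd
          have hkmf : (k.minFac : Int) = I := by omega
          rw [if_pos (by omega), hkmf]
        · rw [if_neg (by tauto)]
          have hnc : ¬ ((k.minFac : Int) < I + 1) := by
            intro hc
            have hkmf : (k.minFac : Int) = I := by omega
            have hdvd : I.toNat ∣ k := by
              have h4 : k.minFac = I.toNat := by omega
              exact h4 ▸ Nat.minFac_dvd k
            apply hmemk
            rw [hmem]
            refine ⟨?_, by omega, by rw [← hqc]; exact_mod_cast hdvd⟩
            -- k is a multiple of the prime I other than I, so k ≥ I*I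
            obtain ⟨c, hc'⟩ := hdvd
            have hc0 : c ≠ 0 := by rintro rfl; omega
            have hc1 : c ≠ 1 := by rintro rfl; omega
            have hcmf : 2 ≤ c.minFac := (Nat.minFac_prime (by omega : c ≠ 1)).two_le
            have h1 : k.minFac ≤ c.minFac :=
              Nat.minFac_le_of_dvd hcmf (dvd_trans (Nat.minFac_dvd c) (Dvd.intro_left I.toNat hc'.symm))
            have h2' : c.minFac ≤ c := Nat.minFac_le (by omega)
            have hIc : I.toNat ≤ c := by omega
            have hmul : I.toNat * I.toNat ≤ I.toNat * c := Nat.mul_le_mul_left _ hIc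
            have hik : (I.toNat : Int) * (I.toNat : Int) ≤ (k : Int) := by
              rw [hc']; push_cast; exact_mod_cast hmul
            nlinarith [hik]
          rw [if_neg hnc]

theorem pvSieve_spec (m : Int) (k : Nat) (h2 : 2 ≤ k) (hk : (k : Int) ≤ m) :
    (pvSieve m).getD k 0 = (k.minFac : Int) := by
  have hm2 : (2:Int) ≤ m := by omega
  have main : ∀ t : Nat, 2 + (t : Int) ≤ m + 1 →
      pvSieveInv m (2 + t) ((PySem.List.pyRange 2 (2 + t) 1).foldl (pvSieveOuter m)
        (List.replicate (m+1).toNat 0)) := by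
    intro t
    induction t with
    | zero =>
      intro _
      rw [show ((0:Nat):Int) = 0 by rfl]
      rw [PySem.List.pyRange_one_eq_nil (by omega)]
      refine ⟨by simp, fun k hk2 hkm => ?_⟩
      have hmf2 : 2 ≤ k.minFac := (Nat.minFac_prime (by omega : k ≠ 1)).two_le
      simp only [List.foldl_nil]
      rw [if_neg (by omega)]
      simp [List.getD_eq_getElem?_getD]
    | succ t ih =>
      intro hb
      have h1 : (2 : Int) + ((t+1 : Nat) : Int) = (2 + (t:Int)) + 1 := by push_cast; ring
      rw [h1, PySem.List.pyRange_one_succ_right (by omega), List.foldl_append, List.foldl_cons,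
        List.foldl_nil]
      exact pvSieveOuter_step m (2 + t) _ (by omega) (by omega) (ih (by push_cast at hb ⊢; omega))
  have hfin := main (m - 1).toNat (by omega)
  have he : (2 : Int) + ((m-1).toNat : Int) = m + 1 := by omega
  rw [he] at hfin
  rw [pvSieve]
  have hmfk : (k.minFac : Int) < m + 1 := by
    have := Nat.minFac_le (by omega : 0 < k)
    omega
  rw [hfin.2 k h2 hk, if_pos hmfk]
def RelInner (n i : Nat) (ind : PySem.Dict Int Nat) (dp : List (Option Int))
    (best : PySem.Dict Int (Option Int)) (cur : Option Int) (prev : Option Int) : Prop :=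
  dp.length = n + 1 ∧ i < n ∧
  dp.getD i none = prev ∧
  dp.getD (i+1) none = cur ∧
  (∀ j, i + 1 < j → dp.getD j none = none) ∧
  (∀ q, ind.contains q = best.contains q) ∧
  (∀ q k, ind.get? q = some k → k ≤ i ∧ dp.getD k none = best.getD q none)

theorem pvGetDO_set_self (l : List (Option Int)) (n : Nat) (a : Option Int) (h : n < l.length) :
    (l.set n a).getD n none = a := by
  simp [List.getD_eq_getElem?_getD, h]

theorem pvGetDO_set_ne (l : List (Option Int)) (n m : Nat) (a : Option Int) (h : n ≠ m) :
    (l.set n a).getD m none = l.getD m none := by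
  simp [List.getD_eq_getElem?_getD, List.getElem?_set_ne h]

theorem RelInner_step (n i : Nat) (ind : PySem.Dict Int Nat) (dp : List (Option Int))
    (best : PySem.Dict Int (Option Int)) (cur prev : Option Int) (p : Int)
    (h : RelInner n i ind dp best cur prev) :
    RelInner n i (pvStepA i (ind, dp) p).1 (pvStepA i (ind, dp) p).2
      (pvStepB prev (best, cur) p).1 (pvStepB prev (best, cur) p).2 prev := by
  obtain ⟨hlen, hin, hdpi, hdpi1, hhi, hpar, hval⟩ := h
  -- names for B's intermediate values
  set bOld := best.getD p none with hbOld
  set b' := if pvLtO prev bOld then prev else bOld with hb'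
  -- the A-side condition and updated index dict
  set cond := (!(ind.contains p) || pvLtO (dp.getD i none) (dp.getD (ind.getD p 0) none)) with hcond
  set ind' := if cond then ind.insert p i else ind with hind'
  set k' := ind'.getD p 0 with hk'
  -- core: dp[k'] = b' and k' ≤ i, and b' = prev when cond
  have hcore : dp.getD k' none = b' ∧ k' ≤ i ∧ (cond = true → b' = prev) ∧
      ind'.get? p = some k' := by
    by_cases hc : ind.contains p = true
    · obtain ⟨k, hk⟩ : ∃ k, ind.get? p = some k := by
        cases hg : ind.get? p with
        | none => rw [(PySem.Dict.get?_eq_none_iff_contains ind p).mp hg] at hc; cases hc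
        | some k => exact ⟨k, rfl⟩
      obtain ⟨hki, hdpk⟩ := hval p k hk
      have hgetD : ind.getD p 0 = k := by
        rw [PySem.Dict.getD_eq_get?_getD, hk]; rfl
      have hcondv : cond = pvLtO prev bOld := by
        rw [hcond, hc, hgetD, hdpi, hdpk]; simp [hbOld]
      by_cases hlt : pvLtO prev bOld = true
      · have hcv : cond = true := by rw [hcondv, hlt]
        have hi' : ind' = ind.insert p i := by rw [hind', hcv]; simp
        have hk'i : k' = i := by
          rw [hk', hi', PySem.Dict.getD_eq_get?_getD, PySem.Dict.get?_insert_self]; rfl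
        refine ⟨by rw [hk'i, hdpi, hb', hlt]; simp, by omega, fun _ => by rw [hb', hlt]; simp,
          by rw [hi', hk'i]; exact PySem.Dict.get?_insert_self ind p i⟩
      · have hcv : cond = false := by rw [hcondv]; simpa using hlt
        have hi' : ind' = ind := by rw [hind', hcv]; simp
        have hk'k : k' = k := by rw [hk', hi', hgetD]
        refine ⟨by rw [hk'k, hdpk, hb', if_neg hlt], by omega,
          (by intro hcc; rw [hcv] at hcc; cases hcc), by rw [hi', hk'k]; exact hk⟩
    · have hcf : ind.contains p = false := by simpa using hc
      have hbf : best.contains p = false := by rw [← hpar]; exact hcf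
      have hbn : bOld = none := by rw [hbOld]; exact PySem.Dict.getD_of_not_contains best none hbf
      have hcv : cond = true := by rw [hcond, hcf]; simp
      have hi' : ind' = ind.insert p i := by rw [hind', hcv]; simp
      have hk'i : k' = i := by
        rw [hk', hi', PySem.Dict.getD_eq_get?_getD, PySem.Dict.get?_insert_self]; rfl
      have hb'p : b' = prev := by
        rw [hb', hbn]
        cases prev with
        | none => simp [pvLtO]
        | some v => simp [pvLtO]
      exact ⟨by rw [hk'i, hdpi, hb'p], by omega, fun _ => hb'p,
        by rw [hi', hk'i]; exact PySem.Dict.get?_insert_self ind p i⟩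
  obtain ⟨hdpk', hk'le, hcondb, hget'⟩ := hcore
  -- A's two dp updates versus B's two cur updates
  have hi1len : i + 1 < dp.length := by omega
  set cur1 := if pvLtO (pvAdd1 b') cur then pvAdd1 b' else cur with hcur1
  set cur2 := if pvLtO (pvAdd1 prev) cur1 then pvAdd1 prev else cur1 with hcur2
  set dp1 := if pvLtO (pvAdd1 (dp.getD k' none)) (dp.getD (i+1) none) then
      dp.set (i+1) (pvAdd1 (dp.getD k' none)) else dp with hdp1
  have hdp1len : dp1.length = n + 1 := by rw [hdp1]; split <;> simp [hlen]
  have hdp1at : ∀ j, j ≠ i + 1 → dp1.getD j none = dp.getD j none := by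
    intro j hj
    rw [hdp1]; split
    · exact pvGetDO_set_ne dp (i+1) j _ (fun hc => hj hc.symm)
    · rfl
  have hdp1i1 : dp1.getD (i+1) none = cur1 := by
    rw [hdp1, hcur1, hdpk', hdpi1]
    split
    · exact pvGetDO_set_self dp (i+1) _ hi1len
    · exact hdpi1
  set dp2 := if pvLtO (pvAdd1 (dp1.getD i none)) (dp1.getD (i+1) none) then
      dp1.set (i+1) (pvAdd1 (dp1.getD i none)) else dp1 with hdp2
  have hdp2len : dp2.length = n + 1 := by rw [hdp2]; split <;> simp [hdp1len]
  have hdp2at : ∀ j, j ≠ i + 1 → dp2.getD j none = dp1.getD j none := by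
    intro j hj
    rw [hdp2]; split
    · exact pvGetDO_set_ne dp1 (i+1) j _ (fun hc => hj hc.symm)
    · rfl
  have hdp1i : dp1.getD i none = prev := by rw [hdp1at i (by omega), hdpi]
  have hdp2i1 : dp2.getD (i+1) none = cur2 := by
    rw [hdp2, hcur2, hdp1i, hdp1i1]
    split
    · exact pvGetDO_set_self dp1 (i+1) _ (by omega)
    · exact hdp1i1
  -- assemble
  have hstepA : pvStepA i (ind, dp) p = (ind', dp2) := by
    rw [pvStepA]
  have hstepB : pvStepB prev (best, cur) p = (best.insert p b', cur2) := by
    rw [pvStepB]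
  rw [hstepA, hstepB]
  refine ⟨hdp2len, hin, ?_, hdp2i1, ?_, ?_, ?_⟩
  · rw [hdp2at i (by omega), hdp1i]
  · intro j hj
    rw [hdp2at j (by omega), hdp1at j (by omega)]
    exact hhi j hj
  · intro q
    rw [hind']
    by_cases hcv : cond = true
    · rw [if_pos hcv, PySem.Dict.contains_insert, PySem.Dict.contains_insert, hpar]
    · have hcf : cond = false := by simpa using hcv
      rw [if_neg hcv, PySem.Dict.contains_insert]
      by_cases hqp : q = p
      · subst hqp
        have hcf2 : (!ind.contains q || pvLtO (dp.getD i none) (dp.getD (ind.getD q 0) none)) = false := by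
          rw [← hcond]; simpa using hcv
        have hcp : ind.contains q = true := by
          rcases Bool.eq_false_or_eq_true (ind.contains q) with h | h
          · exact h
          · rw [h] at hcf2; simp at hcf2
        have hbp : best.contains q = true := by rw [← hpar]; exact hcp
        rw [hcp, hbp]; simp
      · rw [← hpar]
        simp [beq_iff_eq, hqp]
  · intro q k hq
    by_cases hqp : q = p
    · subst hqp
      rw [hget'] at hq
      have hkk : k = k' := by injection hq with h; exact h.symm
      subst hkk
      refine ⟨hk'le, ?_⟩
      rw [PySem.Dict.getD_insert]
      rw [if_pos rfl]
      rcases Nat.lt_or_ge k' (i+1) with hlt | hge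
      · rw [hdp2at k' (by omega), hdp1at k' (by omega), hdpk']
      · omega
    · have hq' : ind.get? q = some k := by
        rw [hind'] at hq
        by_cases hcv : cond = true
        · rw [if_pos hcv, PySem.Dict.get?_insert, if_neg hqp] at hq; exact hq
        · rw [if_neg hcv] at hq; exact hq
      obtain ⟨hki, hdpk⟩ := hval q k hq'
      refine ⟨hki, ?_⟩
      rw [hdp2at k (by omega), hdp1at k (by omega), hdpk,
        PySem.Dict.getD_insert, if_neg hqp]

-- A's while-loop is the fold of pvStepA over the pfChain of num
theorem pvLoopA_eq (m : Int) (mp : List Int)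
    (SP : ∀ k : Nat, 2 ≤ k → (k : Int) ≤ m → mp.getD k 0 = (k.minFac : Int))
    (fuel : Nat) (num : Int) (i : Nat) (s : PySem.Dict Int Nat × List (Option Int))
    (hm : num ≤ m) (hf : num.toNat ≤ fuel) :
    pvLoopA mp i num s fuel
      = (pfCast (pfChain num.toNat)).foldl (pvStepA i) s := by
  induction fuel generalizing num s with
  | zero =>
    rw [show num.toNat = 0 by omega, pfChain_of_lt 0 (by omega)]
    rfl
  | succ f ih =>
    show (if num > 1 then
        pvLoopA mp i (pvStrip (mp.getD num.toNat 0) num num.toNat)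
          (pvStepA i s (mp.getD num.toNat 0)) f
      else s) = _
    by_cases h1 : num > 1
    · obtain ⟨nn, rfl⟩ : ∃ nn : Nat, num = (nn : Int) := ⟨num.toNat, by omega⟩
      simp only [Int.toNat_natCast]
      have h2 : 2 ≤ nn := by exact_mod_cast (by omega : (2:Int) ≤ (nn:Int))
      have hpm : mp.getD nn 0 = (nn.minFac : Int) := SP nn h2 (by exact_mod_cast hm)
      have hmf2 : 2 ≤ nn.minFac := (Nat.minFac_prime (by omega : nn ≠ 1)).two_le
      have hdvd := Nat.minFac_dvd nn
      have hstrip : pvStrip (mp.getD nn 0) (nn : Int) nn = ((stripNat nn.minFac nn : Nat) : Int) := by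
        rw [hpm]
        rw [pvStrip_eq nn ((nn.minFac : Nat) : Int) nn (by exact_mod_cast hmf2) le_rfl (by omega)]
        congr 2
      have hchain : pfChain nn = nn.minFac :: pfChain (stripNat nn.minFac nn) := by
        rw [pfChain, dif_pos h2]
      have hlt : stripNat nn.minFac nn < nn := stripNat_lt _ _ hmf2 hdvd (by omega)
      have hle2 : ((stripNat nn.minFac nn : Nat) : Int) ≤ m := by
        have h5 := stripNat_le nn.minFac nn
        have h6 : ((stripNat nn.minFac nn : Nat) : Int) ≤ (nn : Int) := by exact_mod_cast h5
        omega
      rw [if_pos h1, hstrip, hchain,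
        ih ((stripNat nn.minFac nn : Nat) : Int) (pvStepA i s (mp.getD nn 0)) hle2
          (by rw [Int.toNat_natCast]; omega)]
      rw [Int.toNat_natCast]
      simp only [pfCast, List.foldl_cons]
      rw [hpm]
    · rw [if_neg h1, pfChain_of_lt num.toNat (by omega)]
      rfl

theorem RelInner_fold (n i : Nat) (ps : List Int) (ind : PySem.Dict Int Nat)
    (dp : List (Option Int)) (best : PySem.Dict Int (Option Int)) (cur prev : Option Int)
    (h : RelInner n i ind dp best cur prev) :
    RelInner n i (ps.foldl (pvStepA i) (ind, dp)).1 (ps.foldl (pvStepA i) (ind, dp)).2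
      (ps.foldl (pvStepB prev) (best, cur)).1 (ps.foldl (pvStepB prev) (best, cur)).2 prev := by
  induction ps generalizing ind dp best cur with
  | nil => exact h
  | cons p ps ih =>
    simp only [List.foldl_cons]
    have hstep := RelInner_step n i ind dp best cur prev p h
    have h1 : pvStepA i (ind, dp) p
        = ((pvStepA i (ind, dp) p).1, (pvStepA i (ind, dp) p).2) := rfl
    have h2 : pvStepB prev (best, cur) p
        = ((pvStepB prev (best, cur) p).1, (pvStepB prev (best, cur) p).2) := rfl
    rw [h1, h2]
    exact ih _ _ _ _ hstep

-- the simulation relation between A's state and B's state, between elements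
def RelOuter (n i : Nat) (ind : PySem.Dict Int Nat) (dp : List (Option Int))
    (prev : Option Int) (best : PySem.Dict Int (Option Int)) : Prop :=
  dp.length = n + 1 ∧
  dp.getD i none = prev ∧
  (∀ j, i < j → dp.getD j none = none) ∧
  (∀ q, ind.contains q = best.contains q) ∧
  (∀ q k, ind.get? q = some k → k ≤ i ∧ dp.getD k none = best.getD q none)

theorem RelOuter_fold (m : Int) (mp : List Int)
    (SP : ∀ k : Nat, 2 ≤ k → (k : Int) ≤ m → mp.getD k 0 = (k.minFac : Int))
    (n : Nat) (rest : List Int) (i : Nat) (ind : PySem.Dict Int Nat) (dp : List (Option Int))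
    (prev : Option Int) (best : PySem.Dict Int (Option Int))
    (hlen : i + rest.length = n) (hle : ∀ x ∈ rest, x ≤ m)
    (h : RelOuter n i ind dp prev best) :
    RelOuter n n
      ((PySem.List.enumerate rest (i : Int)).foldl
        (fun (s : PySem.Dict Int Nat × List (Option Int)) iv =>
          pvLoopA mp iv.1.toNat iv.2 s iv.2.toNat) (ind, dp)).1
      ((PySem.List.enumerate rest (i : Int)).foldl
        (fun (s : PySem.Dict Int Nat × List (Option Int)) iv =>
          pvLoopA mp iv.1.toNat iv.2 s iv.2.toNat) (ind, dp)).2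
      (rest.foldl
        (fun (s : Option Int × PySem.Dict Int (Option Int)) num =>
          let t := (pfCast (pfChain num.toNat)).foldl (pvStepB s.1) (s.2, none)
          (t.2, t.1)) (prev, best)).1
      (rest.foldl
        (fun (s : Option Int × PySem.Dict Int (Option Int)) num =>
          let t := (pfCast (pfChain num.toNat)).foldl (pvStepB s.1) (s.2, none)
          (t.2, t.1)) (prev, best)).2 := by
  induction rest generalizing i ind dp prev best with
  | nil =>
    simp only [List.length_nil] at hlen
    rw [PySem.List.enumerate_nil]
    simp only [List.foldl_nil]
    rw [show n = i by omega] at *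
    exact h
  | cons x rest ih =>
    obtain ⟨hl, hdpi, hhi, hpar, hval⟩ := h
    have hin : i < n := by simp at hlen; omega
    rw [PySem.List.enumerate_cons]
    simp only [List.foldl_cons]
    -- the A step on element (i, x)
    have htn : ((i : Int)).toNat = i := Int.toNat_natCast i
    have hAstep : pvLoopA mp ((i : Int)).toNat x (ind, dp) x.toNat
        = (pfCast (pfChain x.toNat)).foldl (pvStepA i) (ind, dp) := by
      rw [htn]
      exact pvLoopA_eq m mp SP x.toNat x i (ind, dp) (hle x List.mem_cons_self) le_rfl
    have hrelin : RelInner n i ind dp best none prev :=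
      ⟨hl, hin, hdpi, hhi (i+1) (by omega), fun j hj => hhi j (by omega), hpar, hval⟩
    have hfold := RelInner_fold n i (pfCast (pfChain x.toNat))
      ind dp best none prev hrelin
    obtain ⟨hl', hin', hdpi', hdpi1', hhi', hpar', hval'⟩ := hfold
    -- repackage as RelOuter (i+1)
    set ps := pfCast (pfChain x.toNat) with hps
    have hrelout : RelOuter n (i+1) (ps.foldl (pvStepA i) (ind, dp)).1
        (ps.foldl (pvStepA i) (ind, dp)).2
        (ps.foldl (pvStepB prev) (best, none)).2
        (ps.foldl (pvStepB prev) (best, none)).1 :=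
      ⟨hl', hdpi1', fun j hj => hhi' j (by omega), hpar',
        fun q k hq => ⟨by exact le_trans (hval' q k hq).1 (by omega), (hval' q k hq).2⟩⟩
    have hcast : (i : Int) + 1 = ((i + 1 : Nat) : Int) := by push_cast; ring
    rw [hAstep, hcast]
    exact ih (i+1) _ _ _ _ (by simp at hlen ⊢; omega)
      (fun y hy => hle y (List.mem_cons_of_mem x hy)) hrelout

-- ===== VERDICT (by name: the statement is the Claim_ definition above) =====
theorem lc_lcp14_spec : Claim_equal_lc_lcp14 := by
  intro nums _ hne
  unfold Spec_lc_lcp14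
  cases hmax : PySem.List.max? nums (fun x => x) with
  | none => exact absurd ((PySem.List.max?_eq_none_iff nums _).mp hmax) hne
  | some m =>
    have hle : ∀ x ∈ nums, x ≤ m := PySem.List.max?_isMax hmax
    have SP : ∀ k : Nat, 2 ≤ k → (k : Int) ≤ m → (pvSieve m).getD k 0 = (k.minFac : Int) :=
      fun k h2 hk => pvSieve_spec m k h2 hk
    have hfun : (fun (s : Option Int × PySem.Dict Int (Option Int)) num =>
          let t := (pvPrimes num).foldl (pvStepB s.1) (s.2, none)
          (t.2, t.1))
        = (fun (s : Option Int × PySem.Dict Int (Option Int)) num =>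
          let t := (pfCast (pfChain num.toNat)).foldl (pvStepB s.1) (s.2, none)
          (t.2, t.1)) := by
      funext s num
      rw [pvPrimes_eq]
    have h0 : RelOuter nums.length 0 PySem.Dict.empty
        (some 0 :: List.replicate nums.length none) (some 0) PySem.Dict.empty := by
      refine ⟨by simp, rfl, ?_, ?_, ?_⟩
      · intro j hj
        cases j with
        | zero => omega
        | succ j' =>
          simp only [List.getD_cons_succ]
          simp [List.getD_eq_getElem?_getD, List.getElem?_replicate]
          split <;> rfl
      · intro q
        rfl
      · intro q k hq
        rw [PySem.Dict.get?_empty] at hq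
        cases hq
    have hmain := RelOuter_fold m (pvSieve m) SP nums.length nums 0 PySem.Dict.empty
      (some 0 :: List.replicate nums.length none) (some 0) PySem.Dict.empty
      (by simp) hle h0
    simp only [Nat.cast_zero] at hmain
    obtain ⟨_, hdpn, _, _, _⟩ := hmain
    have hA : lc_lcp14 nums =
        (if pvLtO (((PySem.List.enumerate nums).foldl
            (fun (s : PySem.Dict Int Nat × List (Option Int)) iv =>
              pvLoopA (pvSieve m) iv.1.toNat iv.2 s iv.2.toNat)
            (PySem.Dict.empty, some 0 :: List.replicate nums.length none)).2.getD
              nums.length none) none then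
          (((PySem.List.enumerate nums).foldl
            (fun (s : PySem.Dict Int Nat × List (Option Int)) iv =>
              pvLoopA (pvSieve m) iv.1.toNat iv.2 s iv.2.toNat)
            (PySem.Dict.empty, some 0 :: List.replicate nums.length none)).2.getD
              nums.length none).getD 0
        else -1) := by
      rw [lc_lcp14, hmax]
    have hB : lc_lcp14_alt nums =
        (match (nums.foldl
            (fun (s : Option Int × PySem.Dict Int (Option Int)) num =>
              let t := (pfCast (pfChain num.toNat)).foldl (pvStepB s.1) (s.2, none)
              (t.2, t.1)) (some 0, PySem.Dict.empty)).1 with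
          | some v => v
          | none => -1) := by
      rw [lc_lcp14_alt, hfun]
    rw [hA, hB, hdpn]
    cases (nums.foldl
        (fun (s : Option Int × PySem.Dict Int (Option Int)) num =>
          let t := (pfCast (pfChain num.toNat)).foldl (pvStepB s.1) (s.2, none)
          (t.2, t.1)) (some 0, PySem.Dict.empty)).1 with
    | none => rfl
    | some v => rfl

@[simp] theorem lc_lcp14_raises : Claim_raises_lc_lcp14 := by
  unfold Claim_raises_lc_lcp14
  exact ⟨fun nums _ hr hp => hp hr, by decide⟩
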